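-- pv_equiv track=rewrite | github.com/MelanySaez/mslg-spa-2026 | enfoque7/enfoque7.2/post_processor.py | _smart_upper
-- ===== SOURCE A (Python) =====
-- def _smart_upper(text: str) -> str:
--     """Uppercase inteligente que preserva el prefijo 'dm-' en minúsculas."""
--     tokens = text.split()
--     out = []
--     for tok in tokens:
--         low = tok.lower()
--         if low.startswith("dm-"):
--             # Conserva 'dm-' y pasa a mayúsculas lo que sigue.
--             out.append("dm-" + tok[3:].upper())
--         else:
--             out.append(tok.upper())
--     return " ".join(out)
-- ===== SOURCE B (Python) =====
-- def _smart_upper(text: str) -> str: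
--     """Uppercase everything at once, then restore the 'dm-' prefix at token starts."""
--     collapsed = " ".join(text.split())
--     return (" " + collapsed.upper()).replace(" DM-", " dm-")[1:]
-- ===== Notes on version B (the rewrite author's own statement) =====
-- stated objective: simpler
-- what changed: A's per-token loop with a conditional prefix branch is replaced by uppercasing the whole whitespace-collapsed string at once and then restoring the lowercase prefix via a single space-anchored replacement on the space-prepended string; no per-token conditional remains.
import Mathlib
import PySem

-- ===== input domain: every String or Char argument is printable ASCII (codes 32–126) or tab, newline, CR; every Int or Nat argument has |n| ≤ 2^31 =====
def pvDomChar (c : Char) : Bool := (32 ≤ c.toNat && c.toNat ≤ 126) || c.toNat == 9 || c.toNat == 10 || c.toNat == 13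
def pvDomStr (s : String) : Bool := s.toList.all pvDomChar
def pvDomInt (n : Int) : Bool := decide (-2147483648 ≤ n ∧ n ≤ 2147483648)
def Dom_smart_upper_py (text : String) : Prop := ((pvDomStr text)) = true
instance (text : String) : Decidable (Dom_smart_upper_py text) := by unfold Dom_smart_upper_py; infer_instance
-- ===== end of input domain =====

-- B replaces A's per-token conditional branch loop by one blanket uppercase of the
-- whitespace-collapsed text followed by a single space-anchored replace that restores the
-- lowercase prefix at token starts (objective: simpler decomposition, same cost).

-- ===== PORT A =====
-- A-side helper: the body of A's per-token loop (the 'dm-' branch).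
def aTokA (tok : List Char) : List Char :=
  if PySem.Chars.startswith (PySem.Chars.lower tok) ['d', 'm', '-'] then
    ['d', 'm', '-'] ++ PySem.Chars.upper (PySem.Chars.slice tok (some 3) none)
  else
    PySem.Chars.upper tok

def smart_upper_py (text : String) : String :=
  let tokens := PySem.Chars.split₀ text.toList
  let out := tokens.foldl (fun acc tok => acc ++ [aTokA tok]) []
  String.ofList (PySem.Chars.join [' '] out)

-- ===== PORT B =====
def smart_upper_py_alt (text : String) : String :=
  let collapsed := PySem.Chars.join [' '] (PySem.Chars.split₀ text.toList)
  String.ofList (PySem.Chars.slice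
    (PySem.Chars.replace ([' '] ++ PySem.Chars.upper collapsed)
      [' ', 'D', 'M', '-'] [' ', 'd', 'm', '-'])
    (some 1) none)

-- ===== PRECONDITION & SPEC =====
def Spec_smart_upper_py (text : String) (out : String) : Prop := out = smart_upper_py_alt text
instance (text : String) (out : String) : Decidable (Spec_smart_upper_py text out) := by unfold Spec_smart_upper_py; infer_instance

-- ===== CLAIM (what is proved, stated in full; the proofs are below) =====
def Claim_equal_smart_upper_py : Prop := ∀ (text : String), Dom_smart_upper_py text → Spec_smart_upper_py text (smart_upper_py text)

-- ===== LEMMAS AND PROOFS =====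

-- Char-level facts
theorem pv_le_iff (a b : Char) : a ≤ b ↔ a.toNat ≤ b.toNat := Iff.rfl

theorem pv_eq_iff (a b : Char) : a = b ↔ a.toNat = b.toNat :=
  ⟨fun h => h ▸ rfl, fun h => Char.ext (UInt32.toNat_inj.mp h)⟩

theorem pv_toNat_ofNat (k : Nat) (h : k < 55296) : (Char.ofNat k).toNat = k := by
  rw [Char.ofNat, dif_pos (Or.inl h)]
  simp [Char.ofNatAux, Char.toNat]

theorem pv_islower_iff (c : Char) :
    PySem.Chars.islower c = true ↔ 97 ≤ c.toNat ∧ c.toNat ≤ 122 := by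
  simp [PySem.Chars.islower, pv_le_iff]

theorem pv_isupper_iff (c : Char) :
    PySem.Chars.isupper c = true ↔ 65 ≤ c.toNat ∧ c.toNat ≤ 90 := by
  simp [PySem.Chars.isupper, pv_le_iff]

theorem pv_ul (c U L : Char) (h1 : 65 ≤ U.toNat) (h2 : U.toNat ≤ 90)
    (h3 : L.toNat = U.toNat + 32) :
    (PySem.Chars.upperChar c = U ↔ PySem.Chars.lowerChar c = L) := by
  unfold PySem.Chars.upperChar PySem.Chars.lowerChar
  by_cases hl : PySem.Chars.islower c = true
  · have hn := (pv_islower_iff c).mp hl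
    have hu : ¬ PySem.Chars.isupper c = true := by
      rw [pv_isupper_iff]; omega
    rw [if_pos hl, if_neg hu, pv_eq_iff, pv_eq_iff, pv_toNat_ofNat _ (by omega)]
    omega
  · have hn : ¬ (97 ≤ c.toNat ∧ c.toNat ≤ 122) := by rw [← pv_islower_iff]; exact hl
    rw [if_neg hl]
    by_cases hu : PySem.Chars.isupper c = true
    · have hn2 := (pv_isupper_iff c).mp hu
      rw [if_pos hu, pv_eq_iff, pv_eq_iff, pv_toNat_ofNat _ (by omega)]
      omega
    · have hn2 : ¬ (65 ≤ c.toNat ∧ c.toNat ≤ 90) := by rw [← pv_isupper_iff]; exact hu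
      rw [if_neg hu, pv_eq_iff, pv_eq_iff]
      omega

theorem pv_ul_dash (c : Char) :
    (PySem.Chars.upperChar c = '-' ↔ PySem.Chars.lowerChar c = '-') := by
  have hd : ('-').toNat = 45 := rfl
  unfold PySem.Chars.upperChar PySem.Chars.lowerChar
  by_cases hl : PySem.Chars.islower c = true
  · have hn := (pv_islower_iff c).mp hl
    have hu : ¬ PySem.Chars.isupper c = true := by rw [pv_isupper_iff]; omega
    rw [if_pos hl, if_neg hu, pv_eq_iff, pv_eq_iff,
      pv_toNat_ofNat (c.toNat - 32) (by omega)]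
    omega
  · rw [if_neg hl]
    by_cases hu : PySem.Chars.isupper c = true
    · have hn2 := (pv_isupper_iff c).mp hu
      rw [if_pos hu, pv_eq_iff, pv_eq_iff,
        pv_toNat_ofNat (c.toNat + 32) (by omega)]
      omega
    · rw [if_neg hu]

theorem pv_upperChar_ne_space (c : Char) (h : PySem.Chars.isspace c = false) :
    PySem.Chars.upperChar c ≠ ' ' := by
  have h32 : c.toNat ≠ 32 := by
    intro hc
    simp [PySem.Chars.isspace, hc] at h
  have hsp : (' ').toNat = 32 := rfl
  unfold PySem.Chars.upperChar
  by_cases hl : PySem.Chars.islower c = true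
  · have hn := (pv_islower_iff c).mp hl
    intro hEq
    rw [if_pos hl, pv_eq_iff, pv_toNat_ofNat (c.toNat - 32) (by omega)] at hEq
    omega
  · intro hEq
    rw [if_neg hl, pv_eq_iff] at hEq
    omega

-- the token test, seen on the uppercased token
theorem pv_dm_iff (t : List Char) :
    ['D', 'M', '-'].isPrefixOf (PySem.Chars.upper t)
      = ['d', 'm', '-'].isPrefixOf (PySem.Chars.lower t) := by
  match t with
  | [] => rfl
  | [a] => simp [PySem.Chars.upper, PySem.Chars.lower, List.isPrefixOf]
  | [a, b] => simp [PySem.Chars.upper, PySem.Chars.lower, List.isPrefixOf]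
  | a :: b :: d :: r =>
    simp only [PySem.Chars.upper, PySem.Chars.lower, List.map_cons, List.isPrefixOf,
      Bool.and_true]
    rw [Bool.eq_iff_iff]
    simp only [Bool.and_eq_true, beq_iff_eq]
    rw [eq_comm (a := 'D'), eq_comm (a := 'M'), eq_comm (a := '-'),
        eq_comm (a := 'd'), eq_comm (a := 'm'), eq_comm (a := '-'),
        pv_ul a 'D' 'd' (by decide) (by decide) (by decide),
        pv_ul b 'M' 'm' (by decide) (by decide) (by decide),
        pv_ul_dash d]

-- B-side recursion spec for replace with the fixed pattern " DM-" / " dm-"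
def rDM : List Char → List Char
  | [] => []
  | c :: t =>
    if [' ', 'D', 'M', '-'].isPrefixOf (c :: t) then
      [' ', 'd', 'm', '-'] ++ rDM (t.drop 3)
    else
      c :: rDM t
termination_by l => l.length
decreasing_by
  · simp only [List.length_cons]
    have h2 : (List.drop 3 t).length = t.length - 3 := List.length_drop ..
    omega
  · simp

theorem pv_go_eq : ∀ (fuel : Nat) (l acc : List Char), l.length ≤ fuel →
    PySem.Chars.replace.go [' ', 'D', 'M', '-'] [' ', 'd', 'm', '-'] fuel l acc
      = acc.reverse ++ rDM l := by
  intro fuel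
  induction fuel with
  | zero =>
    intro l acc h
    have : l = [] := by
      cases l with
      | nil => rfl
      | cons c t => simp at h
    subst this
    simp [PySem.Chars.replace.go, rDM]
  | succ n ih =>
    intro l acc h
    cases l with
    | nil => simp [PySem.Chars.replace.go, rDM]
    | cons c t =>
      rw [PySem.Chars.replace.go]
      by_cases hp : [' ', 'D', 'M', '-'].isPrefixOf (c :: t) = true
      · rw [if_pos hp]
        have hlen : (List.drop 3 t).length ≤ n := by
          have h2 : (List.drop 3 t).length = t.length - 3 := List.length_drop ..
          simp at h
          omega
        rw [show (List.drop [' ', 'D', 'M', '-'].length (c :: t)) = List.drop 3 t from rfl]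
        rw [ih _ _ hlen]
        rw [rDM, if_pos hp]
        simp
      · rw [if_neg hp]
        have hlen : t.length ≤ n := by
          have h2 : (List.drop 3 t).length = t.length - 3 := List.length_drop ..
          simp at h
          omega
        rw [ih _ _ hlen]
        rw [rDM, if_neg hp]
        simp

theorem pv_replace_eq (l : List Char) :
    PySem.Chars.replace l [' ', 'D', 'M', '-'] [' ', 'd', 'm', '-'] = rDM l := by
  rw [PySem.Chars.replace]
  simp only [List.isEmpty_cons]
  exact pv_go_eq l.length l [] (le_refl _)

-- rDM walks over space-free chunks untouched
theorem pv_rDM_skip (w s : List Char) (hw : ∀ c ∈ w, c ≠ ' ') :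
    rDM (w ++ s) = w ++ rDM s := by
  induction w with
  | nil => simp
  | cons c w' ih =>
    have hc : c ≠ ' ' := hw c (by simp)
    have hp : ¬ ([' ', 'D', 'M', '-'].isPrefixOf (c :: (w' ++ s)) = true) := by
      simp [List.isPrefixOf]
      intro h
      exact absurd h.symm hc
    rw [List.cons_append, rDM, if_neg hp, ih (fun c hc' => hw c (by simp [hc']))]
    rfl

-- "DM-" cannot straddle a token boundary
theorem pv_dm_span (u tail : List Char) (ht : tail = [] ∨ ∃ r, tail = ' ' :: r) :
    ['D', 'M', '-'].isPrefixOf (u ++ tail) = ['D', 'M', '-'].isPrefixOf u := by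
  match u with
  | a :: b :: d :: r => simp [List.isPrefixOf]
  | [] =>
    rcases ht with h | ⟨r, h⟩ <;> subst h <;> simp [List.isPrefixOf]
  | [a] =>
    rcases ht with h | ⟨r, h⟩ <;> subst h <;> simp [List.isPrefixOf]
  | [a, b] =>
    rcases ht with h | ⟨r, h⟩ <;> subst h <;> simp [List.isPrefixOf]

-- one token step
theorem pv_step (t s : List Char) (ht : ∀ c ∈ t, PySem.Chars.isspace c = false)
    (hs : s = [] ∨ ∃ r, s = ' ' :: r) :
    rDM (' ' :: (PySem.Chars.upper t ++ s)) = ' ' :: (aTokA t ++ rDM s) := by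
  have hu : ∀ c ∈ PySem.Chars.upper t, c ≠ ' ' := by
    intro c hc
    simp only [PySem.Chars.upper, List.mem_map] at hc
    obtain ⟨c', hc', rfl⟩ := hc
    exact pv_upperChar_ne_space c' (ht c' hc')
  by_cases hb : ['D', 'M', '-'].isPrefixOf (PySem.Chars.upper t) = true
  · -- token starts with dm- (case-insensitively)
    obtain ⟨u3, hu3⟩ : ∃ u3, PySem.Chars.upper t = 'D' :: 'M' :: '-' :: u3 := by
      have := (List.isPrefixOf_iff_prefix.mp hb)
      obtain ⟨u3, h3⟩ := this
      exact ⟨u3, h3.symm⟩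
    have hp : [' ', 'D', 'M', '-'].isPrefixOf (' ' :: (PySem.Chars.upper t ++ s)) = true := by
      rw [hu3]; simp [List.isPrefixOf]
    rw [rDM, if_pos hp]
    have hdrop : (PySem.Chars.upper t ++ s).drop 3 = u3 ++ s := by
      rw [hu3]; rfl
    rw [hdrop, pv_rDM_skip u3 s (fun c hc => hu c (by rw [hu3]; simp [hc]))]
    have hcond : PySem.Chars.startswith (PySem.Chars.lower t) ['d', 'm', '-'] = true := by
      rw [PySem.Chars.startswith, ← pv_dm_iff]; exact hb
    have htok : aTokA t = 'd' :: 'm' :: '-' :: u3 := by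
      unfold aTokA
      rw [if_pos hcond]
      have hsl : PySem.Chars.slice t (some 3) none = t.drop 3 := by
        rw [PySem.Chars.slice_eq_listSlice,
          show (3 : Int) = ((3 : Nat) : Int) from rfl, PySem.List.slice_from_natCast]
      rw [hsl]
      have : PySem.Chars.upper (t.drop 3) = (PySem.Chars.upper t).drop 3 := by
        simp [PySem.Chars.upper, List.map_drop]
      rw [this, hu3]
      rfl
    rw [htok]
    rfl
  · have hp : ¬ ([' ', 'D', 'M', '-'].isPrefixOf (' ' :: (PySem.Chars.upper t ++ s)) = true) := by
      simp only [List.isPrefixOf, beq_self_eq_true, Bool.true_and]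
      rw [pv_dm_span _ _ hs]
      exact hb
    rw [rDM, if_neg hp, pv_rDM_skip _ _ hu]
    have hcond : ¬ (PySem.Chars.startswith (PySem.Chars.lower t) ['d', 'm', '-'] = true) := by
      rw [PySem.Chars.startswith, ← pv_dm_iff]; exact hb
    unfold aTokA
    rw [if_neg hcond]


-- upper distributes over the join
theorem pv_join_singleton (a : List Char) : PySem.Chars.join [' '] [a] = a :=
  PySem.Chars.join_singleton [' '] a

theorem pv_upper_join (ts : List (List Char)) :
    PySem.Chars.upper (PySem.Chars.join [' '] ts)
      = PySem.Chars.join [' '] (ts.map PySem.Chars.upper) := by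
  induction ts with
  | nil => rfl
  | cons a l ih =>
    cases l with
    | nil => simp only [List.map_cons, List.map_nil, pv_join_singleton]
    | cons b l' =>
      simp only [List.map_cons] at ih ⊢
      rw [PySem.Chars.join_cons_cons, PySem.Chars.join_cons_cons, ← ih]
      simp [PySem.Chars.upper, show PySem.Chars.upperChar ' ' = ' ' from rfl]

-- the whole joined string
theorem pv_main (ts : List (List Char))
    (h : ∀ t ∈ ts, ∀ c ∈ t, PySem.Chars.isspace c = false) :
    rDM (' ' :: PySem.Chars.join [' '] (ts.map PySem.Chars.upper))
      = ' ' :: PySem.Chars.join [' '] (ts.map aTokA) := by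
  have hnil : rDM [] = [] := by rw [rDM]
  induction ts with
  | nil =>
    have hstep := pv_step [] [] (by simp) (Or.inl rfl)
    have ha : aTokA [] = [] := by
      unfold aTokA
      simp [PySem.Chars.lower, PySem.Chars.startswith, PySem.Chars.upper]
    rw [show PySem.Chars.upper [] = [] from rfl] at hstep
    simp only [ha, hnil, List.append_nil] at hstep
    simpa [PySem.Chars.join] using hstep
  | cons t rest ih =>
    have ht := h t (by simp)
    have hrest : ∀ t' ∈ rest, ∀ c ∈ t', PySem.Chars.isspace c = false :=
      fun t' ht' => h t' (by simp [ht'])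
    cases rest with
    | nil =>
      have hstep := pv_step t [] ht (Or.inl rfl)
      rw [List.append_nil, hnil, List.append_nil] at hstep
      simpa [pv_join_singleton] using hstep
    | cons r rs =>
      simp only [List.map_cons] at ih ⊢
      rw [PySem.Chars.join_cons_cons, PySem.Chars.join_cons_cons, List.append_assoc,
        List.append_assoc]
      rw [show (([' '] : List Char) ++ PySem.Chars.join [' '] (PySem.Chars.upper r :: List.map PySem.Chars.upper rs))
          = ' ' :: PySem.Chars.join [' '] (PySem.Chars.upper r :: List.map PySem.Chars.upper rs) from rfl]
      rw [pv_step t _ ht (Or.inr ⟨_, rfl⟩), ih hrest]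
      rfl

-- split() produces tokens without whitespace
theorem pv_go_tokens : ∀ (s cur : List Char) (acc : List (List Char)),
    (∀ c ∈ cur, PySem.Chars.isspace c = false) →
    (∀ t ∈ acc, ∀ c ∈ t, PySem.Chars.isspace c = false) →
    ∀ t ∈ PySem.Chars.split₀.go s cur acc, ∀ c ∈ t, PySem.Chars.isspace c = false := by
  intro s
  induction s with
  | nil =>
    intro cur acc hcur hacc t htmem
    rw [PySem.Chars.split₀.go] at htmem
    by_cases hce : cur.isEmpty = true
    · rw [if_pos hce] at htmem
      rw [List.mem_reverse] at htmem
      exact hacc t htmem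
    · rw [if_neg hce] at htmem
      rw [List.mem_reverse, List.mem_cons] at htmem
      rcases htmem with h | h
      · subst h; intro ch hch; exact hcur ch (List.mem_reverse.mp hch)
      · exact hacc t h
  | cons c rest ih =>
    intro cur acc hcur hacc t htmem
    rw [PySem.Chars.split₀.go] at htmem
    by_cases hsp : PySem.Chars.isspace c = true
    · rw [if_pos hsp] at htmem
      by_cases hce : cur.isEmpty = true
      · rw [if_pos hce] at htmem
        exact ih [] acc (by simp) hacc t htmem
      · rw [if_neg hce] at htmem
        refine ih [] (cur.reverse :: acc) (by simp) ?_ t htmem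
        intro t' ht'
        rw [List.mem_cons] at ht'
        rcases ht' with h | h
        · subst h; intro ch hch; exact hcur ch (List.mem_reverse.mp hch)
        · exact hacc t' h
    · rw [if_neg hsp] at htmem
      refine ih (c :: cur) acc ?_ hacc t htmem
      intro c' hc'
      rw [List.mem_cons] at hc'
      rcases hc' with h | h
      · subst h; simpa using hsp
      · exact hcur c' h

theorem pv_tokens (l : List Char) :
    ∀ t ∈ PySem.Chars.split₀ l, ∀ c ∈ t, PySem.Chars.isspace c = false := by
  rw [PySem.Chars.split₀]
  exact pv_go_tokens l [] [] (by simp) (by simp)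

-- ===== VERDICT (by name: the statement is the Claim_ definition above) =====
theorem smart_upper_py_spec : Claim_equal_smart_upper_py := by
  intro text _
  show smart_upper_py text = smart_upper_py_alt text
  simp only [smart_upper_py, smart_upper_py_alt]
  rw [PySem.List.foldl_append_singleton_eq_map]
  rw [List.nil_append]
  rw [pv_replace_eq]
  rw [show ([' '] ++ PySem.Chars.upper (PySem.Chars.join [' '] (PySem.Chars.split₀ text.toList)))
      = ' ' :: PySem.Chars.upper (PySem.Chars.join [' '] (PySem.Chars.split₀ text.toList)) from rfl]
  rw [pv_upper_join, pv_main _ (pv_tokens text.toList)]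
  have hsl : ∀ (x : List Char), PySem.Chars.slice (' ' :: x) (some 1) none = x := by
    intro x
    rw [PySem.Chars.slice_eq_listSlice, PySem.List.slice_from_one]
    rfl
  rw [hsl]
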